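-- pv_equiv track=rewrite | github.com/Spiderasasen/Portfolio | projects/Python/ciphers/code/atbash.py | atbash_encrypt
-- ===== SOURCE A (Python) =====
-- def atbash_encrypt(message: str) -> str:
--     """
--     Encrypts a plaintext message using the atbash cipher
--     (encrption and decryption are the same for atbash)
--
--     Args:
--         message (str): the plaintext message to encrypt
--
--     returns:
--         str: the atbash-encrypted ciphertext
--     """
--     processed_message = ""
--
--     for char in message:
--         if 'a' <= char <= 'z':
--             #calculates the 0 based index for lowercase
--             original_index = ord(char) - ord('a')
--             #calculate reversed index: 25 - orginal index
--             new_char_code = ord('a') + (25 - original_index)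
--             processed_message += chr(new_char_code)
--         elif 'A' <= char <= 'Z':
--             #calculates the 0 based index for uppercase
--             original_index = ord(char) - ord('A')
--             #calculate reversed index: 25 - orginal index
--             new_char_code = ord('A') + (25 - original_index)
--             processed_message += chr(new_char_code)
--         else:
--             #nothing will happen, so let it be
--             processed_message += char
--
--     return processed_message
-- ===== SOURCE B (Python) =====
-- import string
--
-- _LOWER = string.ascii_lowercase
-- _UPPER = string.ascii_uppercase
-- _REV_LOWER = _LOWER[::-1]
-- _REV_UPPER = _UPPER[::-1]
--
-- def atbash_encrypt(message: str) -> str: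
--     """Atbash by divide and conquer: split the message in half and encrypt the
--     halves recursively; a single character is located in the alphabet and read
--     off at the same position of the reversed alphabet."""
--     n = len(message)
--     if n == 0:
--         return ""
--     if n == 1:
--         i = _LOWER.find(message)
--         if i >= 0:
--             return _REV_LOWER[i]
--         j = _UPPER.find(message)
--         if j >= 0:
--             return _REV_UPPER[j]
--         return message
--     m = n // 2
--     return atbash_encrypt(message[:m]) + atbash_encrypt(message[m:])
-- ===== Notes on version B (the rewrite author's own statement) =====
-- stated objective: alternative
-- what changed: B is a divide-and-conquer recursion that splits the message in half and concatenates the encrypted halves, with a base case that locates the single character in the alphabet and reads the reversed alphabet at that position, replacing A's left-to-right accumulator loop with ord/chr arithmetic.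
import Mathlib
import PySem

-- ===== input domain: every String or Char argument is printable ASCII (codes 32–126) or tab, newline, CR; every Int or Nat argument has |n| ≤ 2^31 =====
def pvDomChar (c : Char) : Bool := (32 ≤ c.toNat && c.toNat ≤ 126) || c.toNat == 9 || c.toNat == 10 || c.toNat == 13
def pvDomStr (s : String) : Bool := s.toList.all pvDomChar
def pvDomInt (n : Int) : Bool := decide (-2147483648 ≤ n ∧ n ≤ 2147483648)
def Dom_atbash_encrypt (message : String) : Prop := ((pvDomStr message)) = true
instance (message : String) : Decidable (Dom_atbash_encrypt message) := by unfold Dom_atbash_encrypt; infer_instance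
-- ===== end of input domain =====

-- B replaces A's left-to-right accumulator loop (ord/chr arithmetic per char) with a
-- divide-and-conquer recursion: split in half, encrypt halves, concatenate; a single
-- character is found in the alphabet and read off the reversed alphabet.

-- ===== PORT A =====
-- per-character body of A's loop (the three branches, in A's order)
def atbashCharA (c : Char) : Char :=
  if 'a' ≤ c ∧ c ≤ 'z' then
    Char.ofNat ('a'.toNat + (25 - (c.toNat - 'a'.toNat)))
  else if 'A' ≤ c ∧ c ≤ 'Z' then
    Char.ofNat ('A'.toNat + (25 - (c.toNat - 'A'.toNat)))
  else c

def atbash_encrypt (message : String) : String :=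
  message.toList.foldl (fun acc c => acc.push (atbashCharA c)) ""

-- ===== PORT B =====
-- the module-level constants of Source B, as char lists
def pvLower : List Char := "abcdefghijklmnopqrstuvwxyz".toList
def pvUpper : List Char := "ABCDEFGHIJKLMNOPQRSTUVWXYZ".toList
def pvRevLower : List Char := pvLower.reverse      -- _LOWER[::-1]
def pvRevUpper : List Char := pvUpper.reverse      -- _UPPER[::-1]

-- Source B's n == 1 case: find the char in the alphabet, index the reversed alphabet
def atbashCharB (c : Char) : Char :=
  let i := PySem.Chars.find pvLower [c]
  if 0 ≤ i then (PySem.List.pyGet? pvRevLower i).getD c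
  else
    let j := PySem.Chars.find pvUpper [c]
    if 0 ≤ j then (PySem.List.pyGet? pvRevUpper j).getD c
    else c

-- Source B's recursion: n = 0 / n = 1 base cases, else split at n // 2 and recurse
def atbashGo : List Char → List Char
  | [] => []
  | [c] => [atbashCharB c]
  | a :: b :: t =>
      let m := (a :: b :: t).length / 2
      atbashGo ((a :: b :: t).take m) ++ atbashGo ((a :: b :: t).drop m)
termination_by l => l.length
decreasing_by
  · simp; omega
  · simp; omega

def atbash_encrypt_alt (message : String) : String :=
  String.ofList (atbashGo message.toList)

-- ===== PRECONDITION & SPEC =====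
def Spec_atbash_encrypt (message : String) (out : String) : Prop := out = atbash_encrypt_alt message
instance (message : String) (out : String) : Decidable (Spec_atbash_encrypt message out) := by unfold Spec_atbash_encrypt; infer_instance

-- ===== CLAIM =====
def Claim_equal_atbash_encrypt : Prop := ∀ (message : String), Dom_atbash_encrypt message → Spec_atbash_encrypt message (atbash_encrypt message)

-- ===== LEMMAS AND PROOFS =====

-- A's push-loop is the map of its per-character body
theorem atbash_foldl_toList (l : List Char) (acc : String) :
    (l.foldl (fun a c => a.push (atbashCharA c)) acc).toList
      = acc.toList ++ l.map atbashCharA := by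
  induction l generalizing acc with
  | nil => simp
  | cons c t ih => simp [ih]

-- B's divide-and-conquer computes the map of its base case
theorem atbashGo_eq (l : List Char) : atbashGo l = l.map atbashCharB := by
  induction l using atbashGo.induct with
  | case1 => simp [atbashGo]
  | case2 c => simp [atbashGo]
  | case3 a b t m ih1 ih2 =>
      rw [atbashGo]
      show atbashGo ((a :: b :: t).take m) ++ atbashGo ((a :: b :: t).drop m)
            = (a :: b :: t).map atbashCharB
      rw [ih1, ih2, ← List.map_append, List.take_append_drop]

-- the two per-character maps agree on all 127 ASCII codes
theorem atbash_char_range :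
    (List.range 127).all
      (fun n => atbashCharA (Char.ofNat n) == atbashCharB (Char.ofNat n)) = true := by
  set_option maxRecDepth 8000 in decide

theorem atbash_char_eq (c : Char) (h : pvDomChar c = true) :
    atbashCharA c = atbashCharB c := by
  have hc : c.toNat < 127 := by
    simp only [pvDomChar, Bool.or_eq_true, Bool.and_eq_true, decide_eq_true_eq, beq_iff_eq] at h
    omega
  have := List.all_eq_true.mp atbash_char_range c.toNat (List.mem_range.mpr hc)
  simpa [Char.ofNat_toNat] using eq_of_beq this

-- ===== VERDICT =====
theorem atbash_encrypt_spec : Claim_equal_atbash_encrypt := by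
  intro message hdom
  unfold Spec_atbash_encrypt atbash_encrypt atbash_encrypt_alt
  apply String.ext
  rw [atbash_foldl_toList, atbashGo_eq]
  simp only [String.toList_ofList, String.toList_empty, List.nil_append]
  exact List.map_congr_left fun c hc =>
    atbash_char_eq c (List.all_eq_true.mp hdom c hc)
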